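-- pv_equiv track=rewrite | github.com/keerthirajsivashankar/My_Python_Solutions | Medium/red_and_blue.py | redandblack
-- ===== SOURCE A (Python) =====
-- def redandblack(colors , k):
--     n  = len(colors)
--     extended_colors = colors + colors
--     count = 0
--     current_length = 1
--     for i in range(1,len(extended_colors)):
--         if extended_colors[i] != extended_colors[i-1]:
--             current_length += 1
--         else:
--             current_length = 1
--         if current_length >= k and i < 2 * n and i >= n :
--             count += 1
--     return count
-- ===== SOURCE B (Python) =====
-- def redandblack(colors, k):
--     # alternative: check each ending position's k-window directly instead of
--     # carrying a running run-length accumulator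
--     n = len(colors)
--     ext = colors + colors
--     count = 0
--     for i in range(n, 2 * n):
--         if k <= i + 1:
--             if all(ext[i - j] != ext[i - j - 1] for j in range(k - 1)):
--                 count += 1
--     return count
-- ===== Notes on version B (the rewrite author's own statement) =====
-- stated objective: alternative
-- what changed: Instead of carrying a running run-length accumulator through one scan of the doubled string, B tests each ending position in [n, 2n) directly by checking that its k-1 preceding adjacent pairs all differ (a stateless per-position window check).
import Mathlib
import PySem

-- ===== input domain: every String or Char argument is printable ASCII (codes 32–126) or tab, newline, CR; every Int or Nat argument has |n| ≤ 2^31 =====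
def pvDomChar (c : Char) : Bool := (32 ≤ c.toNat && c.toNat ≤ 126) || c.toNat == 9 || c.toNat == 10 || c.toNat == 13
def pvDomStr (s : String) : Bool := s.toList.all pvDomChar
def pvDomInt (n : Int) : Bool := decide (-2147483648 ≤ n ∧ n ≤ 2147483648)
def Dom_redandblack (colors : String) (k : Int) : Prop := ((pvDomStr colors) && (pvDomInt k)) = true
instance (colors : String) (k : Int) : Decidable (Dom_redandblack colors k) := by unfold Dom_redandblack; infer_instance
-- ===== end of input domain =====

-- B replaces A's running run-length accumulator by a direct per-position test of the
-- k-1 preceding adjacent pairs (alternative decomposition; no speed claim).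

-- ===== PORT A =====
def redandblack (colors : String) (k : Int) : Int :=
  let n : Int := PySem.Str.len colors
  let ext : List Char := colors.toList ++ colors.toList
  let r :=
    (PySem.List.pyRange 1 ((ext.length : Int))).foldl
      (fun (st : Int × Int) i =>
        let cur : Int :=
          if PySem.List.pyGet? ext i ≠ PySem.List.pyGet? ext (i - 1) then st.2 + 1 else 1
        let cnt : Int :=
          if (k ≤ cur) ∧ i < 2 * n ∧ n ≤ i then st.1 + 1 else st.1
        (cnt, cur)) (0, 1)
  r.1

-- ===== PORT B =====
def redandblack_alt (colors : String) (k : Int) : Int :=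
  let n : Int := PySem.Str.len colors
  let ext : List Char := colors.toList ++ colors.toList
  (PySem.List.pyRange n (2 * n)).foldl
    (fun (cnt : Int) i =>
      if k ≤ i + 1 then
        if (PySem.List.pyRange 0 (k - 1)).all
            (fun j => decide (PySem.List.pyGet? ext (i - j) ≠ PySem.List.pyGet? ext (i - j - 1))) then
          cnt + 1
        else cnt
      else cnt) 0

-- ===== PRECONDITION & SPEC =====
def Spec_redandblack (colors : String) (k : Int) (out : Int) : Prop := out = redandblack_alt colors k
instance (colors : String) (k : Int) (out : Int) : Decidable (Spec_redandblack colors k out) := by unfold Spec_redandblack; infer_instance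

-- ===== CLAIM (what is proved, stated in full; the proofs are below) =====
def Claim_equal_redandblack : Prop := ∀ (colors : String) (k : Int), Dom_redandblack colors k → Spec_redandblack colors k (redandblack colors k)

-- ===== LEMMAS AND PROOFS =====

/-- Run length of the alternating run of `ext` ending at index `i`
(A's `current_length` after loop step `i`). -/
def pvRL (ext : List Char) : Nat → Nat
  | 0 => 1
  | i + 1 =>
      if PySem.List.pyGet? ext ((i : Int) + 1) = PySem.List.pyGet? ext (i : Int) then 1
      else pvRL ext i + 1

/-- A's loop after processing indices 1..m: the pair (count so far, current run length). -/
lemma pvA_fold (ext : List Char) (k n : Int) (m : Nat) :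
    (PySem.List.pyRange 1 ((m : Int) + 1)).foldl
      (fun (st : Int × Int) i =>
        ((if (k ≤ if PySem.List.pyGet? ext i ≠ PySem.List.pyGet? ext (i - 1) then st.2 + 1 else 1)
              ∧ i < 2 * n ∧ n ≤ i then st.1 + 1 else st.1),
         (if PySem.List.pyGet? ext i ≠ PySem.List.pyGet? ext (i - 1) then st.2 + 1 else 1))) (0, 1)
    = (((List.range' 1 m).countP
          (fun i => decide (k ≤ (pvRL ext i : Int) ∧ (i : Int) < 2 * n ∧ n ≤ (i : Int))) : Int),
        (pvRL ext m : Int)) := by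
  induction m with
  | zero => simp [PySem.List.pyRange, pvRL]
  | succ m ih =>
      rw [show ((m + 1 : Nat) : Int) + 1 = ((m : Int) + 1) + 1 by push_cast; ring]
      rw [PySem.List.pyRange_one_succ_right (by omega)]
      rw [List.foldl_append, ih]
      simp only [List.foldl_cons, List.foldl_nil]
      have hrl : (pvRL ext (m + 1) : Int)
          = if PySem.List.pyGet? ext ((m : Int) + 1) ≠ PySem.List.pyGet? ext ((m : Int) + 1 - 1)
            then (pvRL ext m : Int) + 1 else 1 := by
        simp only [pvRL]
        by_cases h : PySem.List.pyGet? ext ((m : Int) + 1) = PySem.List.pyGet? ext (m : Int)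
        · simp [show (m : Int) + 1 - 1 = (m : Int) by ring]
        · simp [show (m : Int) + 1 - 1 = (m : Int) by ring]
      rw [List.range'_concat, List.countP_append]
      simp only [List.countP_cons, List.countP_nil]
      rw [← hrl, show (1 + 1 * m) = m + 1 by ring]
      have hc : ((m + 1 : Nat) : Int) = (m : Int) + 1 := by push_cast; ring
      by_cases h : k ≤ (pvRL ext (m+1) : Int) ∧ (m : Int) + 1 < 2 * n ∧ n ≤ (m : Int) + 1
      · simp [h, hc]
      · simp [h, hc]

/-- B's window test is exactly `k ≤ run length ending at i`. -/
lemma pvWindow (ext : List Char) (i : Nat) : ∀ (k : Int),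
    (k ≤ (pvRL ext i : Int)) ↔
      (k ≤ (i : Int) + 1 ∧
        ∀ j : Int, 0 ≤ j → j < k - 1 →
          PySem.List.pyGet? ext ((i : Int) - j) ≠ PySem.List.pyGet? ext ((i : Int) - j - 1)) := by
  induction i with
  | zero =>
      intro k
      simp only [pvRL, Nat.cast_zero, Nat.cast_one]
      constructor
      · intro hk; exact ⟨by omega, fun j h0 h1 => absurd (by omega : k ≤ 1) (by omega)⟩
      · rintro ⟨hk, _⟩; omega
  | succ i ih =>
      intro k
      have hc : ((i + 1 : Nat) : Int) = (i : Int) + 1 := by push_cast; ring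
      by_cases heq : PySem.List.pyGet? ext ((i : Int) + 1) = PySem.List.pyGet? ext (i : Int)
      · simp only [pvRL, if_pos heq, hc, Nat.cast_one]
        constructor
        · intro hk
          refine ⟨by omega, fun j h0 h1 => absurd (by omega : k ≤ 1) (by omega)⟩
        · rintro ⟨hk, hall⟩
          by_contra h
          have := hall 0 le_rfl (by omega)
          simp only [sub_zero] at this
          exact this (by rw [show (i : Int) + 1 - 1 = (i : Int) by ring]; exact heq)
      · simp only [pvRL, if_neg heq, hc, Nat.cast_add, Nat.cast_one]
        have hIH := ih (k - 1)
        constructor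
        · intro hk
          have hk' : k - 1 ≤ (pvRL ext i : Int) := by omega
          obtain ⟨hb, hall⟩ := hIH.mp hk'
          refine ⟨by omega, fun j h0 h1 => ?_⟩
          by_cases hj : j = 0
          · subst hj
            simpa [show (i:Int) + 1 - 0 - 1 = (i : Int) by ring] using heq
          · have := hall (j - 1) (by omega) (by omega)
            rw [show (i : Int) + 1 - j = (i : Int) - (j - 1) by ring]
            exact this
        · rintro ⟨hb, hall⟩
          have : k - 1 ≤ (pvRL ext i : Int) := by
            apply hIH.mpr
            refine ⟨by omega, fun j h0 h1 => ?_⟩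
            have := hall (j + 1) (by omega) (by omega)
            rw [show (i : Int) - j = (i : Int) + 1 - (j + 1) by ring]
            exact this
          omega

/-- `range(a, a+m)` over `Int` is the cast of `List.range' a m`. -/
lemma pvRange_cast (a m : Nat) :
    PySem.List.pyRange (a : Int) ((a : Int) + (m : Int)) = (List.range' a m).map Int.ofNat := by
  induction m generalizing a with
  | zero => simp [PySem.List.pyRange]
  | succ m ih =>
      rw [show ((a : Int) + ((m : Nat) + 1 : Nat)) = ((a : Int) + 1) + (m : Int) by push_cast; ring]
      rw [PySem.List.pyRange_one_cons (by omega)]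
      rw [show ((a : Int) + 1) = ((a + 1 : Nat) : Int) by push_cast; ring]
      rw [ih (a + 1)]
      simp [List.range'_succ, Int.ofNat_eq_natCast]

lemma pvRange_nil (a b : Int) (h : b ≤ a) : PySem.List.pyRange a b = [] := by
  rw [List.eq_nil_iff_forall_not_mem]; intro x hx
  rw [PySem.List.mem_pyRange_one] at hx; omega

/-- The whole equivalence, stated over the character list. -/
lemma pvMain (cs : List Char) (k : Int) :
    ((PySem.List.pyRange 1 (((cs ++ cs).length : Int))).foldl
      (fun (st : Int × Int) i =>
        ((if (k ≤ if PySem.List.pyGet? (cs ++ cs) i ≠ PySem.List.pyGet? (cs ++ cs) (i - 1) then st.2 + 1 else 1)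
              ∧ i < 2 * (cs.length : Int) ∧ (cs.length : Int) ≤ i then st.1 + 1 else st.1),
         (if PySem.List.pyGet? (cs ++ cs) i ≠ PySem.List.pyGet? (cs ++ cs) (i - 1) then st.2 + 1 else 1))) (0, 1)).1
    = (PySem.List.pyRange (cs.length : Int) (2 * (cs.length : Int))).foldl
        (fun (cnt : Int) i =>
          if k ≤ i + 1 then
            if (PySem.List.pyRange 0 (k - 1)).all
                (fun j => decide (PySem.List.pyGet? (cs ++ cs) (i - j) ≠ PySem.List.pyGet? (cs ++ cs) (i - j - 1))) then
              cnt + 1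
            else cnt
          else cnt) 0 := by
  set ext : List Char := cs ++ cs with hext
  set nn := cs.length with hnn
  by_cases h0 : nn = 0
  · have hcs : cs = [] := List.eq_nil_of_length_eq_zero h0
    rw [pvRange_nil ((nn : Int)) (2 * (nn : Int)) (by omega),
        pvRange_nil 1 ((ext.length : Int)) (by simp [hext, hcs])]
    simp
  · have hlen : ((ext).length : Int) = ((2 * nn - 1 : Nat) : Int) + 1 := by
      simp [hext, List.length_append]; omega
    rw [hlen, pvA_fold ext k (nn : Int) (2 * nn - 1)]
    rw [PySem.List.foldl_congr_mem _ _
      (fun (cnt : Int) i =>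
        if (k ≤ i + 1 ∧ (∀ j : Int, 0 ≤ j → j < k - 1 →
              PySem.List.pyGet? ext (i - j) ≠ PySem.List.pyGet? ext (i - j - 1))) then cnt + 1 else cnt) 0
      (by
        intro acc x _
        beta_reduce
        by_cases h1 : k ≤ x + 1
        · by_cases h2 : (PySem.List.pyRange 0 (k - 1)).all
              (fun j => decide (PySem.List.pyGet? ext (x - j) ≠ PySem.List.pyGet? ext (x - j - 1))) = true
          · rw [if_pos h1, if_pos h2, if_pos]
            refine ⟨h1, fun j hj0 hj1 => ?_⟩
            exact of_decide_eq_true ((List.all_eq_true.mp h2) j (PySem.List.mem_pyRange_one.mpr ⟨hj0, hj1⟩))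
          · rw [if_pos h1, if_neg h2, if_neg]
            rintro ⟨-, hall⟩
            apply h2
            refine List.all_eq_true.mpr fun j hj => ?_
            have := PySem.List.mem_pyRange_one.mp hj
            exact decide_eq_true (hall j this.1 this.2)
        · rw [if_neg h1, if_neg (by rintro ⟨h, -⟩; exact h1 h)])]
    rw [PySem.List.foldl_ite_add_one]
    rw [show PySem.List.pyRange ((nn : Int)) (2 * (nn : Int))
          = (List.range' nn nn).map Int.ofNat from by
        rw [show (2 * (nn : Int)) = (nn : Int) + (nn : Int) by ring]
        exact pvRange_cast nn nn]
    rw [List.countP_map (f := Int.ofNat) (l := List.range' nn nn)]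
    have hsplit : List.range' 1 (2 * nn - 1) = List.range' 1 (nn - 1) ++ List.range' nn nn := by
      rw [show List.range' nn nn = List.range' (1 + 1 * (nn - 1)) nn by congr 1; omega,
          List.range'_append]
      congr 1; omega
    rw [hsplit, List.countP_append]
    have hz : (List.range' 1 (nn - 1)).countP
        (fun i => decide (k ≤ (pvRL ext i : Int) ∧ (i : Int) < 2 * (nn : Int) ∧ (nn : Int) ≤ (i : Int))) = 0 := by
      refine List.countP_eq_zero.mpr fun a ha => ?_
      have := List.mem_range'_1.mp ha
      simp only [decide_eq_true_eq, not_and]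
      intro _ _; omega
    rw [hz]
    rw [List.countP_congr (l := List.range' nn nn)
      (p := fun i => decide (k ≤ (pvRL ext i : Int) ∧ (i : Int) < 2 * (nn : Int) ∧ (nn : Int) ≤ (i : Int)))
      (q := ((fun x : Int =>
        decide (k ≤ x + 1 ∧ ∀ j : Int, 0 ≤ j → j < k - 1 →
          PySem.List.pyGet? ext (x - j) ≠ PySem.List.pyGet? ext (x - j - 1))) ∘ Int.ofNat))
      (fun x hx => by
        have hb := List.mem_range'_1.mp hx
        simp only [Function.comp, Int.ofNat_eq_natCast, decide_eq_true_eq]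
        constructor
        · rintro ⟨h1, -, -⟩; exact (pvWindow ext x k).mp h1
        · intro h; exact ⟨(pvWindow ext x k).mpr h, by omega, by omega⟩)]
    simp

-- ===== VERDICT (by name: the statement is the Claim_ definition above) =====
theorem redandblack_spec : Claim_equal_redandblack := by
  intro colors k _
  show redandblack colors k = redandblack_alt colors k
  unfold redandblack redandblack_alt
  rw [PySem.Str.len_eq]
  exact pvMain colors.toList k
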